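-- pv_equiv track=rewrite | github.com/rostikmakhanko/adventofcode-2023 | 12.2.py | check
-- ===== SOURCE A (Python) =====
-- def check(s, a):
--     sn = len(s)
--     an = len(a)
--     k = 0
--     j = 0
--     for i in range(sn):
--         if s[i] == '#':
--             k += 1
--         else:
--             if k > 0:
--                 if j >= an:
--                     return False
--                 if a[j] != k:
--                     return False
--                 j += 1
--                 k = 0
--     if k > 0:
--         if j >= an:
--             return False
--         if a[j] != k:
--             return False
--         j += 1
--         k = 0
--     if j == an:
--         return True
--     else:
--         return False
-- ===== SOURCE B (Python) =====
-- def check(s, a):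
--     runs = []
--     k = 0
--     for c in s:
--         if c == '#':
--             k += 1
--         elif k:
--             runs.append(k)
--             k = 0
--     if k:
--         runs.append(k)
--     return runs == list(a)
-- ===== Notes on version B (the rewrite author's own statement) =====
-- stated objective: simpler
-- what changed: B builds the full list of '#' run-lengths in one pass and compares it to a with a single list equality, replacing A's online validation with index j, bounds checks and three early returns.
import Mathlib
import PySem

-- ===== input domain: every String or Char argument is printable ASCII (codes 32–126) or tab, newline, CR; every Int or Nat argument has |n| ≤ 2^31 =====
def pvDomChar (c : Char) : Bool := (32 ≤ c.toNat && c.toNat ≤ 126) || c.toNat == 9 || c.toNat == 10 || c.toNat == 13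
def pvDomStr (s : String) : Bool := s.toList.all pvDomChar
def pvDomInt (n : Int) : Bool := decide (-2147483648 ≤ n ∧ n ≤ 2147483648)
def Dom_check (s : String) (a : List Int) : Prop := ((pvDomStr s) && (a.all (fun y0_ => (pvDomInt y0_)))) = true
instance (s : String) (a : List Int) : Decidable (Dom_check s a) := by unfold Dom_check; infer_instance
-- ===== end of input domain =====

-- B builds the whole list of '#' run-lengths in one pass and compares it to `a` with a single
-- list equality, replacing A's online validation (index j, bounds checks, three early returns); simpler, same cost.

-- ===== PORT A =====
-- the for-loop with its early `return False`s, state k (current run length) and j (index into a);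
-- the [] case is the code after the loop (flush the trailing run, then `j == an`)
def checkAux (a : List Int) (an : Int) : List Char → Int → Int → Bool
  | [], k, j =>
    if k > 0 then
      if j ≥ an then false
      else if PySem.List.pyGet? a j ≠ some k then false
      else (j + 1) == an
    else j == an
  | c :: cs, k, j =>
    if c = '#' then checkAux a an cs (k + 1) j
    else if k > 0 then
      if j ≥ an then false
      else if PySem.List.pyGet? a j ≠ some k then false
      else checkAux a an cs 0 (j + 1)
    else checkAux a an cs k j

def check (s : String) (a : List Int) : Bool :=
  checkAux a (a.length : Int) s.toList 0 0

-- ===== PORT B =====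
def check_alt (s : String) (a : List Int) : Bool :=
  let st := s.toList.foldl
    (fun (st : List Int × Int) c =>
      if c = '#' then (st.1, st.2 + 1)
      else if st.2 ≠ 0 then (st.1 ++ [st.2], 0)
      else st)
    ([], 0)
  let runs := if st.2 ≠ 0 then st.1 ++ [st.2] else st.1
  runs == a

-- ===== PRECONDITION & SPEC =====
def Spec_check (s : String) (a : List Int) (out : Bool) : Prop := out = check_alt s a
instance (s : String) (a : List Int) (out : Bool) : Decidable (Spec_check s a out) := by unfold Spec_check; infer_instance

-- ===== CLAIM (what is proved, stated in full; the proofs are below) =====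
def Claim_equal_check : Prop := ∀ (s : String) (a : List Int), Dom_check s a → Spec_check s a (check s a)

-- ===== LEMMAS AND PROOFS =====

-- proof-side names for B's fold step and final flush (definitionally the lambdas in check_alt)
def stepB (st : List Int × Int) (c : Char) : List Int × Int :=
  if c = '#' then (st.1, st.2 + 1)
  else if st.2 ≠ 0 then (st.1 ++ [st.2], 0)
  else st

def flushB (st : List Int × Int) : List Int :=
  if st.2 ≠ 0 then st.1 ++ [st.2] else st.1

-- proof-side characterisation of the run-length list
def runsAux : List Char → Int → List Int
  | [], k => if k ≠ 0 then [k] else []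
  | c :: cs, k =>
    if c = '#' then runsAux cs (k + 1)
    else if k ≠ 0 then k :: runsAux cs 0
    else runsAux cs k

theorem beq_eq_decide' {α : Type} [BEq α] [LawfulBEq α] [DecidableEq α] (x y : α) :
    (x == y) = decide (x = y) := by
  by_cases h : x = y <;> simp [h]

-- B's fold (with the final flush applied) computes runs ++ runsAux cs k
theorem foldB_eq (cs : List Char) (runs : List Int) (k : Int) :
    flushB (cs.foldl stepB (runs, k)) = runs ++ runsAux cs k := by
  induction cs generalizing runs k with
  | nil => simp only [List.foldl_nil, flushB, runsAux]; split_ifs <;> simp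
  | cons c cs ih =>
    simp only [List.foldl_cons, runsAux]
    by_cases hc : c = '#'
    · rw [show stepB (runs, k) c = (runs, k + 1) from by simp [stepB, hc], ih, if_pos hc]
    · by_cases hk : k ≠ 0
      · rw [show stepB (runs, k) c = (runs ++ [k], 0) from by simp [stepB, hc, hk], ih,
          if_neg hc, if_pos hk]
        simp
      · rw [show stepB (runs, k) c = (runs, k) from by simp [stepB, hc, hk], ih,
          if_neg hc, if_neg hk]

-- A's validator at state (k, j) accepts iff the remaining run-lengths equal the rest of a
theorem checkAux_eq (a : List Int) (cs : List Char) (k : Int) (j : Nat)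
    (hk : 0 ≤ k) (hj : j ≤ a.length) :
    checkAux a (a.length : Int) cs k (j : Int) = decide (runsAux cs k = a.drop j) := by
  induction cs generalizing k j with
  | nil =>
    simp only [checkAux]
    by_cases hkp : k > 0
    · have hk0 : k ≠ 0 := by omega
      rw [if_pos hkp, show runsAux [] k = [k] from by simp [runsAux, hk0]]
      by_cases hjlt : j < a.length
      · have h1 : ¬ ((j : Int) ≥ (a.length : Int)) := by exact_mod_cast by omega
        have hdrop : a.drop j = a[j] :: a.drop (j + 1) := List.drop_eq_getElem_cons hjlt
        rw [if_neg h1, PySem.List.pyGet?_natCast, List.getElem?_eq_getElem hjlt]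
        by_cases heq : a[j] = k
        · rw [if_neg (by simp [heq]), beq_eq_decide']
          simp only [decide_eq_decide]
          constructor
          · intro h
            have hend : j + 1 = a.length := by exact_mod_cast h
            rw [hdrop, List.drop_eq_nil_iff.mpr (by omega), heq]
          · intro h
            rw [hdrop] at h
            obtain ⟨h1, h2⟩ := List.cons_eq_cons.mp h
            have : j + 1 = a.length := by
              have := List.drop_eq_nil_iff.mp h2.symm; omega
            exact_mod_cast this
        · rw [if_pos (by simp [heq])]
          symm
          simp only [decide_eq_false_iff_not]
          intro h
          rw [hdrop] at h
          exact heq (List.cons_eq_cons.mp h).1.symm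
      · have h1 : ((j : Int) ≥ (a.length : Int)) := by exact_mod_cast by omega
        rw [if_pos h1]
        rw [List.drop_eq_nil_iff.mpr (by omega)]
        simp
    · have hk0 : k = 0 := by omega
      rw [if_neg hkp, show runsAux [] k = [] from by simp [runsAux, hk0], beq_eq_decide']
      simp only [decide_eq_decide]
      constructor
      · intro h
        rw [List.drop_eq_nil_iff.mpr (by exact_mod_cast le_of_eq (by exact_mod_cast h.symm))]
      · intro h
        have : j = a.length := by
          have := List.drop_eq_nil_iff.mp h.symm; omega
        exact_mod_cast this
  | cons c cs ih =>
    by_cases hc : c = '#'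
    · have hr : runsAux (c :: cs) k = runsAux cs (k + 1) := by simp [runsAux, hc]
      simp only [checkAux, hr, if_pos hc]
      exact ih (k + 1) j (by omega) hj
    · by_cases hkp : k > 0
      · have hk0 : k ≠ 0 := by omega
        have hr : runsAux (c :: cs) k = k :: runsAux cs 0 := by simp [runsAux, hc, hk0]
        simp only [checkAux, hr]
        rw [if_neg hc, if_pos hkp]
        by_cases hjlt : j < a.length
        · have h1 : ¬ ((j : Int) ≥ (a.length : Int)) := by exact_mod_cast by omega
          have hdrop : a.drop j = a[j] :: a.drop (j + 1) := List.drop_eq_getElem_cons hjlt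
          rw [if_neg h1, PySem.List.pyGet?_natCast, List.getElem?_eq_getElem hjlt]
          by_cases heq : a[j] = k
          · rw [if_neg (by simp [heq]),
              show ((j : Int) + 1) = ((j + 1 : Nat) : Int) from by push_cast; ring,
              ih 0 (j + 1) (by omega) (by omega)]
            simp [hdrop, heq]
          · rw [if_pos (by simp [heq])]
            symm
            simp only [decide_eq_false_iff_not]
            intro h
            rw [hdrop] at h
            exact heq (List.cons_eq_cons.mp h).1.symm
        · have h1 : ((j : Int) ≥ (a.length : Int)) := by exact_mod_cast by omega
          rw [if_pos h1]
          rw [List.drop_eq_nil_iff.mpr (by omega)]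
          simp
      · have hk0 : k = 0 := by omega
        have hr : runsAux (c :: cs) k = runsAux cs k := by simp [runsAux, hc, hk0]
        simp only [checkAux, hr]
        rw [if_neg hc, if_neg hkp]
        exact ih k j hk hj

-- ===== VERDICT (by name: the statement is the Claim_ definition above) =====
theorem check_spec : Claim_equal_check := by
  intro s a _
  unfold Spec_check check check_alt
  show checkAux a (a.length : Int) s.toList 0 0 = (flushB (s.toList.foldl stepB ([], 0)) == a)
  rw [foldB_eq s.toList [] 0, List.nil_append, beq_eq_decide']
  have h := checkAux_eq a s.toList 0 0 (by omega) (by omega)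
  simpa using h
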